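-- pv_equiv track=rewrite | github.com/kush-3/CSC2720 | practice/problem2.py | mask_string
-- ===== SOURCE A (Python) =====
-- def mask_string(s):
--     n = len(s)
--     all_digits = s.isdigit()
--
--     if all_digits and n >= 6:
--         s = list(s)
--         for i in range(2, n - 4):
--             s[i] = "*"
--         return "".join(s)
--
--     if all_digits and n < 6:
--         return "*" * n
--
--     if "@" in s:
--         s = list(s)
--         idx = s.index("@")
--         for i in range(1, idx):
--             s[i] = "*"
--         return "".join(s).lower()
--
--
--     return s
-- ===== SOURCE B (Python) =====
-- def mask_string(s):
--     n = len(s)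
--     if s.isdigit():
--         return s[:2] + "*" * (n - 6) + s[-4:] if n >= 6 else "*" * n
--     if "@" in s:
--         idx = s.index("@")
--         return (s[:1] + "*" * (idx - 1) + s[idx:]).lower() if idx else s.lower()
--     return s
-- ===== Notes on version B (the rewrite author's own statement) =====
-- stated objective: simpler
-- what changed: Replaced both character-mutation loops (list(s) plus index-by-index assignment and join) with closed-form slice concatenation: prefix + star-run + suffix for long digit strings and for the email branch, guarded on a leading at-sign.
import Mathlib
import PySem

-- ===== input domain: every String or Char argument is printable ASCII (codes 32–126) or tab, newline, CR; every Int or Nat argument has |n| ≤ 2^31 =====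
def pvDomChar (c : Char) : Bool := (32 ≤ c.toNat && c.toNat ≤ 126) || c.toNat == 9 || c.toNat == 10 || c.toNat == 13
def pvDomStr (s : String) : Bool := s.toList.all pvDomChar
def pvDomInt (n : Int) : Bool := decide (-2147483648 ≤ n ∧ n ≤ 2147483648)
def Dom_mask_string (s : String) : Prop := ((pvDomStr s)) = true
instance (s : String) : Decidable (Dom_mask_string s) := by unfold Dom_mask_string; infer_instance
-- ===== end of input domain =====

-- B replaces A's two character-mutation loops (list(s), index assignments, join) with closed-form
-- slice concatenation; same return value, objective: simpler.

-- ===== PORT A =====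
-- Literal port of A.  `s = list(s)` + the index-assignment loop is the foldl over the same range
-- with List.set; `"".join(s)` is String.mk.  `s.index("@")` is PySem.List.index?; the preceding
-- `"@" in s` guard guarantees it is `some`, so `.getD 0` is never the default on reached inputs.
def mask_string (s : String) : String :=
  let l := s.toList
  let n := l.length
  let allDigits := PySem.Chars.strIsdigit l
  if allDigits && decide (6 ≤ n) then
    String.mk ((PySem.List.pyRange 2 ((n : Int) - 4) 1).foldl (fun m i => m.set i.toNat '*') l)
  else if allDigits && decide (n < 6) then
    String.mk (List.replicate n '*')
  else if PySem.Chars.isIn ['@'] l then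
    let idx := (PySem.List.index? l '@').getD 0
    String.mk (PySem.Chars.lower
      ((PySem.List.pyRange 1 (idx : Int) 1).foldl (fun m i => m.set i.toNat '*') l))
  else s

-- ===== PORT B =====
-- Literal port of Source B.  Slices s[:2], s[-4:], s[:1], s[idx:] are PySem.List.slice; "*" * k is
-- List.replicate.  `s.index("@")` (string method, guarded by `"@" in s`, so it never raises) is
-- PySem.Chars.find, which is exactly the index of the first occurrence when present.
def mask_string_alt (s : String) : String :=
  let l := s.toList
  let n := l.length
  if PySem.Chars.strIsdigit l then
    if 6 ≤ n then
      String.mk (PySem.List.slice l none (some 2)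
        ++ List.replicate (n - 6) '*' ++ PySem.List.slice l (some (-4)) none)
    else
      String.mk (List.replicate n '*')
  else if PySem.Chars.isIn ['@'] l then
    let idx := PySem.Chars.find l ['@']
    if idx ≠ 0 then
      String.mk (PySem.Chars.lower (PySem.List.slice l none (some 1)
        ++ List.replicate (idx - 1).toNat '*' ++ PySem.List.slice l (some idx) none))
    else
      String.mk (PySem.Chars.lower l)
  else s

-- ===== PRECONDITION & SPEC =====
def Spec_mask_string (s : String) (out : String) : Prop := out = mask_string_alt s
instance (s : String) (out : String) : Decidable (Spec_mask_string s out) := by unfold Spec_mask_string; infer_instance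

-- ===== CLAIM (what is proved, stated in full; the proofs are below) =====
def Claim_equal_mask_string : Prop := ∀ (s : String), Dom_mask_string s → Spec_mask_string s (mask_string s)

-- ===== LEMMAS AND PROOFS =====

-- a singleton prefix of a drop is exactly the character at that index
theorem singleton_prefix_drop (l : List Char) (t : Nat) (h : t < l.length) :
    ['@'] <+: l.drop t ↔ l[t] = '@' := by
  constructor
  · rintro ⟨r, hr⟩
    have h2 : (l.drop t)[0]? = some '@' := by rw [← hr]; rfl
    simpa [List.getElem?_drop, h] using h2
  · intro hv
    refine ⟨l.drop (t + 1), ?_⟩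
    rw [List.drop_eq_getElem_cons h, hv]
    rfl

-- taking one past a just-set index appends the written character
theorem take_succ_set (l : List Char) (a : Nat) (h : a < l.length) :
    (l.set a '*').take (a + 1) = l.take a ++ ['*'] := by
  rw [List.set_eq_take_cons_drop '*' h, List.take_append]
  simp [List.length_take, Nat.min_eq_left h.le]

-- A's masking loop over range(a, a+k) in closed form
theorem foldl_set_range (k : Nat) : ∀ (a : Nat) (l : List Char), a + k ≤ l.length →
    (PySem.List.pyRange (a : Int) ((a : Int) + (k : Int)) 1).foldl
        (fun m i => m.set i.toNat '*') l
      = l.take a ++ List.replicate k '*' ++ l.drop (a + k) := by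
  induction k with
  | zero =>
    intro a l _
    rw [PySem.List.pyRange_one_eq_nil (by omega)]
    simp
  | succ k ih =>
    intro a l hlen
    rw [PySem.List.pyRange_one_cons (by omega)]
    have ha : a < l.length := by omega
    have hcast : ((a : Int) + 1) = ((a + 1 : Nat) : Int) := by push_cast; ring
    have hcast2 : ((a : Int) + ((k + 1 : Nat) : Int)) = ((a + 1 : Nat) : Int) + (k : Int) := by
      push_cast; ring
    rw [List.foldl_cons, Int.toNat_natCast, hcast2, hcast,
        ih (a + 1) (l.set a '*') (by simpa using by omega)]
    rw [take_succ_set l a ha, List.drop_set_of_lt (by omega : a < a + 1 + k)]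
    have : a + 1 + k = a + (k + 1) := by omega
    rw [this, List.replicate_succ]
    simp

-- cast-adjusted form of foldl_set_range, to rewrite against Int-literal bounds in the ports
theorem foldl_mask (a k : Nat) (l : List Char) (h : a + k ≤ l.length)
    (ai b : Int) (hai : ai = (a : Int)) (hb : b = (a : Int) + (k : Int)) :
    (PySem.List.pyRange ai b 1).foldl (fun m i => m.set i.toNat '*') l
      = l.take a ++ List.replicate k '*' ++ l.drop (a + k) := by
  subst hai hb
  exact foldl_set_range k a l h

-- Chars.find of a present single character is its first index
theorem find_eq_index (l : List Char) (j : Nat) (hidx : PySem.List.index? l '@' = some j) :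
    PySem.Chars.find l ['@'] = (j : Int) := by
  obtain ⟨hj, hval, hmin⟩ := PySem.List.getElem_of_index?_eq_some hidx
  have hmem : '@' ∈ l := by exact List.mem_of_getElem hval
  have hinf : ['@'] <:+: l := (List.singleton_infix_iff '@' l).mpr hmem
  have h0 : 0 ≤ PySem.Chars.find l ['@'] := (PySem.Chars.find_nonneg_iff l ['@']).mpr hinf
  obtain ⟨hpre, hfirst⟩ := PySem.Chars.find_spec h0
  have hlt : (PySem.Chars.find l ['@']).toNat < l.length := by
    by_contra hge
    push_neg at hge
    have : l.drop (PySem.Chars.find l ['@']).toNat = [] := List.drop_eq_nil_of_le hge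
    rw [this] at hpre
    exact absurd (List.prefix_nil.mp hpre) (by simp)
  have heq : (PySem.Chars.find l ['@']).toNat = j := by
    rcases Nat.lt_trichotomy (PySem.Chars.find l ['@']).toNat j with h | h | h
    · exact absurd ((singleton_prefix_drop l _ hlt).mp hpre) (hmin _ h)
    · exact h
    · exact absurd ((singleton_prefix_drop l j hj).mpr hval) (hfirst j h)
  omega

-- isIn ['@'] is membership of '@'
theorem isIn_at_iff (l : List Char) : PySem.Chars.isIn ['@'] l = true ↔ '@' ∈ l := by
  rw [PySem.Chars.isIn_iff_infix, List.singleton_infix_iff]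

-- ===== VERDICT (by name: the statement is the Claim_ definition above) =====
theorem mask_string_spec : Claim_equal_mask_string := by
  intro s _
  unfold Spec_mask_string mask_string mask_string_alt
  set l := s.toList with hl
  by_cases hd : PySem.Chars.strIsdigit l
  · by_cases h6 : 6 ≤ l.length
    · -- long all-digit string: loop over range(2, n-4) equals the slice form
      simp only [hd, h6, decide_true, Bool.true_and, if_pos]
      rw [foldl_mask 2 (l.length - 6) l (by omega) 2 ((l.length : Int) - 4) (by norm_num)
            (by omega)]
      rw [PySem.List.slice_to l (by norm_num), PySem.List.slice_from_neg_ofNat l 4 (by norm_num)]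
      have : 2 + (l.length - 6) = l.length - 4 := by omega
      rw [this]
      simp
    · -- short all-digit string
      simp [hd, h6, Nat.lt_of_not_le h6]
  · -- not all digits
    simp only [hd, Bool.false_and, if_neg, Bool.false_eq_true, not_false_eq_true]
    by_cases hat : PySem.Chars.isIn ['@'] l
    · rw [if_pos hat, if_pos hat]
      have hmem : '@' ∈ l := (isIn_at_iff l).mp hat
      obtain ⟨j, hidx⟩ := Option.isSome_iff_exists.mp
        ((PySem.List.index?_isSome_iff l '@').mpr hmem)
      obtain ⟨hj, hval, hmin⟩ := PySem.List.getElem_of_index?_eq_some hidx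
      rw [hidx, find_eq_index l j hidx]
      simp only [Option.getD_some]
      by_cases hj0 : j = 0
      · -- '@' is the first character: both sides lower the string unchanged
        subst hj0
        rw [if_neg (by norm_num), PySem.List.pyRange_one_eq_nil (by norm_num)]
        simp
      · -- '@' at index j ≥ 1: loop over range(1, j) equals the slice form
        rw [if_pos (by exact_mod_cast hj0)]
        rw [foldl_mask 1 (j - 1) l (by omega) 1 (j : Int) (by norm_num) (by omega)]
        rw [PySem.List.slice_to l (by norm_num), PySem.List.slice_from l (by positivity)]
        have h1j : 1 + (j - 1) = j := by omega
        have hrep : (((j : Nat) : Int) - 1).toNat = j - 1 := by omega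
        rw [h1j, hrep]
        norm_num
    · rw [if_neg hat, if_neg hat]
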